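-- pv_equiv track=rewrite | github.com/birkin/usep_gh_handler_app | utils/processor.py | _update_xml
-- ===== SOURCE A (Python) =====
-- def _update_xml( initial_xml ):
--     """ Updates and returns xml. """
--     modified_xml = initial_xml
--     mapper = {
--         u'http://library.brown.edu/usep_data/resources/include_publicationStmt.xml': u'../resources/include_publicationStmt.xml',
--         u'http://library.brown.edu/usep_data/resources/include_taxonomies.xml': u'../resources/include_taxonomies.xml',
--         u'http://library.brown.edu/usep_data/resources/titles.xml': u'../resources/titles.xml',
--     }
--     for (key, value) in mapper.items():
--         modified_xml = modified_xml.replace( key, value )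
--     return modified_xml
-- ===== SOURCE B (Python) =====
-- def _update_xml( initial_xml ):
--     """ Updates and returns xml (single left-to-right scan instead of three full replace passes). """
--     mapper = {
--         u'http://library.brown.edu/usep_data/resources/include_publicationStmt.xml': u'../resources/include_publicationStmt.xml',
--         u'http://library.brown.edu/usep_data/resources/include_taxonomies.xml': u'../resources/include_taxonomies.xml',
--         u'http://library.brown.edu/usep_data/resources/titles.xml': u'../resources/titles.xml',
--     }
--     pieces = []
--     i = 0
--     n = len(initial_xml)
--     while i < n:
--         for key, value in mapper.items():
--             if initial_xml.startswith(key, i):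
--                 pieces.append(value)
--                 i += len(key)
--                 break
--         else:
--             pieces.append(initial_xml[i])
--             i += 1
--     return ''.join(pieces)
-- ===== Notes on version B (the rewrite author's own statement) =====
-- stated objective: alternative
-- what changed: A makes three sequential full-string str.replace passes (one per URL); B makes a single left-to-right scan that tries the three fixed URLs at each position, emitting the relative path and jumping over a matched key.
import Mathlib
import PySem

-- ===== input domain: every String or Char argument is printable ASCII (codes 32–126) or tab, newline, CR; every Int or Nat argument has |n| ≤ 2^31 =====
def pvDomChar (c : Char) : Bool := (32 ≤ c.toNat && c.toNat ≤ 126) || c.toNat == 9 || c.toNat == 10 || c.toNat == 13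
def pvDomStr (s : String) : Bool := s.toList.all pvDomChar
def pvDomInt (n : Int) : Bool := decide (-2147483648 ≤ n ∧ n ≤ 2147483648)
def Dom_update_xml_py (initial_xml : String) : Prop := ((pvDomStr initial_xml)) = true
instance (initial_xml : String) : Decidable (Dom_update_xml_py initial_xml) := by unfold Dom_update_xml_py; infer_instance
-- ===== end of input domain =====

-- B replaces A's three sequential full-string str.replace passes by ONE left-to-right scan that
-- tries the three fixed URLs at each position (objective: alternative single-pass algorithm).

-- ===== PORT A =====
def update_xml_py (initial_xml : String) : String :=
  let mapper : PySem.Dict String String :=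
    ((PySem.Dict.empty.insert "http://library.brown.edu/usep_data/resources/include_publicationStmt.xml" "../resources/include_publicationStmt.xml").insert
      "http://library.brown.edu/usep_data/resources/include_taxonomies.xml" "../resources/include_taxonomies.xml").insert
      "http://library.brown.edu/usep_data/resources/titles.xml" "../resources/titles.xml"
  mapper.items.foldl (fun modified_xml kv => PySem.Str.replace modified_xml kv.1 kv.2) initial_xml

-- ===== PORT B =====
-- the three (key, value) pairs of Source B's mapper, as char lists
def pvK1 : List Char := "http://library.brown.edu/usep_data/resources/include_publicationStmt.xml".toList
def pvV1 : List Char := "../resources/include_publicationStmt.xml".toList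
def pvK2 : List Char := "http://library.brown.edu/usep_data/resources/include_taxonomies.xml".toList
def pvV2 : List Char := "../resources/include_taxonomies.xml".toList
def pvK3 : List Char := "http://library.brown.edu/usep_data/resources/titles.xml".toList
def pvV3 : List Char := "../resources/titles.xml".toList

-- Source B's while loop: at each position try the three keys (dict order); on a hit emit the value and
-- jump over the key, otherwise copy one character.  The advancing index i is the dropped prefix.
def pvScanB (s : List Char) : List Char :=
  match s with
  | [] => []
  | c :: t =>
    if PySem.Chars.startswith (c :: t) pvK1 then pvV1 ++ pvScanB ((c :: t).drop pvK1.length)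
    else if PySem.Chars.startswith (c :: t) pvK2 then pvV2 ++ pvScanB ((c :: t).drop pvK2.length)
    else if PySem.Chars.startswith (c :: t) pvK3 then pvV3 ++ pvScanB ((c :: t).drop pvK3.length)
    else c :: pvScanB t
termination_by s.length
decreasing_by
  · have h : 0 < pvK1.length := by decide
    simp [List.length_drop]; omega
  · have h : 0 < pvK2.length := by decide
    simp [List.length_drop]; omega
  · have h : 0 < pvK3.length := by decide
    simp [List.length_drop]; omega
  · simp

def update_xml_py_alt (initial_xml : String) : String :=
  String.ofList (pvScanB initial_xml.toList)

-- ===== PRECONDITION & SPEC =====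
def Spec_update_xml_py (initial_xml : String) (out : String) : Prop := out = update_xml_py_alt initial_xml
instance (initial_xml : String) (out : String) : Decidable (Spec_update_xml_py initial_xml out) := by unfold Spec_update_xml_py; infer_instance

-- ===== CLAIM (what is proved, stated in full; the proofs are below) =====
def Claim_equal_update_xml_py : Prop := ∀ (initial_xml : String), Dom_update_xml_py initial_xml → Spec_update_xml_py initial_xml (update_xml_py initial_xml)

-- ===== LEMMAS AND PROOFS =====

-- fuel-free reformulation of PySem.Chars.replace (for old ≠ [])
def pvRepl (old new : List Char) (s : List Char) : List Char :=
  match s with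
  | [] => []
  | c :: t =>
    if h : old ≠ [] ∧ old.isPrefixOf (c :: t) then new ++ pvRepl old new ((c :: t).drop old.length)
    else c :: pvRepl old new t
termination_by s.length
decreasing_by
  · have h1 : 0 < old.length := List.length_pos_iff.mpr h.1
    simp [List.length_drop]; omega
  · simp

lemma pvRepl_nil (old new : List Char) : pvRepl old new [] = [] := by rw [pvRepl]

lemma pvRepl_pos (old new s : List Char) (hne : old ≠ []) (hp : old <+: s) :
    pvRepl old new s = new ++ pvRepl old new (s.drop old.length) := by
  cases s with
  | nil => exact absurd (List.prefix_nil.mp hp) hne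
  | cons c t =>
    rw [pvRepl]
    rw [dif_pos ⟨hne, List.isPrefixOf_iff_prefix.mpr hp⟩]

lemma pvRepl_neg (old new : List Char) (c : Char) (t : List Char) (hp : ¬ old <+: (c :: t)) :
    pvRepl old new (c :: t) = c :: pvRepl old new t := by
  rw [pvRepl]
  rw [dif_neg (fun h => hp (List.isPrefixOf_iff_prefix.mp h.2))]

lemma pvGo_eq (old new : List Char) (hne : old ≠ []) :
    ∀ (fuel : Nat) (l acc : List Char), l.length ≤ fuel →
      PySem.Chars.replace.go old new fuel l acc = acc.reverse ++ pvRepl old new l := by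
  intro fuel
  induction fuel with
  | zero =>
    intro l acc hl
    have : l = [] := List.eq_nil_of_length_eq_zero (Nat.le_zero.mp hl)
    subst this
    simp [PySem.Chars.replace.go, pvRepl_nil]
  | succ fuel ih =>
    intro l acc hl
    cases l with
    | nil => simp [PySem.Chars.replace.go, pvRepl_nil]
    | cons c t =>
      rw [PySem.Chars.replace.go]
      by_cases hp : old.isPrefixOf (c :: t)
      · rw [if_pos hp]
        have hol : 0 < old.length := List.length_pos_iff.mpr hne
        rw [ih _ _ (by simp at hl ⊢; omega)]
        rw [pvRepl_pos old new (c :: t) hne (List.isPrefixOf_iff_prefix.mp hp)]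
        simp
      · rw [if_neg hp]
        rw [ih _ _ (by simp at hl ⊢; omega)]
        rw [pvRepl_neg old new c t (fun h => hp (List.isPrefixOf_iff_prefix.mpr h))]
        simp

lemma pvReplace_eq (s old new : List Char) (hne : old ≠ []) :
    PySem.Chars.replace s old new = pvRepl old new s := by
  unfold PySem.Chars.replace
  rw [if_neg (by simpa [List.isEmpty_iff] using hne)]
  simpa using pvGo_eq old new hne s.length s [] le_rfl

-- getD of a prefix agrees
lemma pvPrefix_getD {l₁ l₂ : List Char} (h : l₁ <+: l₂) {i : Nat} (hi : i < l₁.length) (d : Char) :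
    l₂.getD i d = l₁.getD i d := by
  obtain ⟨t, rfl⟩ := h
  rw [List.getD_eq_getElem _ _ hi, List.getD_eq_getElem _ _ (by simp; omega),
    List.getElem_append_left hi]

lemma pvNotPrefix_of_getD_ne (old l : List Char) (hne : old ≠ []) (d : Char)
    (h : l.getD 0 d ≠ old.getD 0 d) : ¬ old <+: l := by
  intro hp
  exact h (pvPrefix_getD hp (List.length_pos_iff.mpr hne) d)

lemma pvGetD_drop0 (l : List Char) (i : Nat) (d : Char) (h : i < l.length) :
    (l.drop i).getD 0 d = l.getD i d := by
  rw [List.getD_eq_getElem _ _ (by simp; omega), List.getD_eq_getElem _ _ h]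
  simp [List.getElem_drop]

lemma pvGetD_drop1 (l : List Char) (i : Nat) (d : Char) (h : i + 1 < l.length) :
    (l.drop i).getD 1 d = l.getD (i + 1) d := by
  rw [List.getD_eq_getElem _ _ (by simp; omega), List.getD_eq_getElem _ _ h]
  simp [List.getElem_drop]

lemma pvGetD_append (l₁ l₂ : List Char) (j : Nat) (d : Char) (h : j < l₁.length) :
    (l₁ ++ l₂).getD j d = l₁.getD j d := by
  rw [List.getD_eq_getElem _ _ (by simp; omega), List.getD_eq_getElem _ _ h,
    List.getElem_append_left h]

-- W: a proper (i ≥ 1) suffix of a key w survives a pvRepl pass: if it is a prefix of the output it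
-- was a prefix of the input (uses: w never contains new's first two chars '..' adjacently)
lemma pvW (old new w : List Char) (hne : old ≠ []) (h2 : 2 ≤ new.length)
    (hdot : ∀ i, i < w.length → 1 ≤ i → w.getD i 'z' = new.getD 0 'z' →
      i + 1 < w.length ∧ w.getD (i + 1) 'z' ≠ new.getD 1 'z') :
    ∀ (s : List Char) (i : Nat), 1 ≤ i → i ≤ w.length →
      w.drop i <+: pvRepl old new s → w.drop i <+: s := by
  intro s
  induction s with
  | nil =>
    intro i _ _ hp
    rw [pvRepl_nil] at hp
    exact hp
  | cons c t ih =>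
    intro i h1 hi hp
    rcases Nat.lt_or_ge i w.length with hlt | hge
    · by_cases hpre : old <+: (c :: t)
      · exfalso
        rw [pvRepl_pos old new (c :: t) hne hpre] at hp
        have e0 : w.getD i 'z' = new.getD 0 'z' := by
          have h0 := pvPrefix_getD hp (i := 0) (by simp; omega) 'z'
          rw [pvGetD_drop0 w i 'z' (by omega)] at h0
          rw [pvGetD_append new _ 0 'z' (by omega)] at h0
          exact h0.symm
        obtain ⟨hlt2, hne2⟩ := hdot i hlt h1 e0
        apply hne2
        have h1' := pvPrefix_getD hp (i := 1) (by simp; omega) 'z'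
        rw [pvGetD_drop1 w i 'z' (by omega)] at h1'
        rw [pvGetD_append new _ 1 'z' (by omega)] at h1'
        exact h1'.symm
      · rw [pvRepl_neg old new c t hpre] at hp
        rw [List.drop_eq_getElem_cons hlt] at hp ⊢
        rw [List.cons_prefix_cons] at hp ⊢
        exact ⟨hp.1, ih (i + 1) (by omega) (by omega) hp.2⟩
    · have : w.drop i = [] := List.drop_eq_nil_of_le (by omega)
      rw [this]
      exact List.nil_prefix

-- A: a key w appearing as a prefix of the output of a pvRepl pass was already there, unless old
-- itself matched at position 0
lemma pvA (old new w : List Char) (hne : old ≠ []) (h2 : 2 ≤ new.length)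
    (hdot : ∀ i, i < w.length → 1 ≤ i → w.getD i 'z' = new.getD 0 'z' →
      i + 1 < w.length ∧ w.getD (i + 1) 'z' ≠ new.getD 1 'z') :
    ∀ s : List Char, w <+: pvRepl old new s → old <+: s ∨ w <+: s := by
  intro s hp
  cases s with
  | nil =>
    right
    rw [pvRepl_nil] at hp
    exact hp
  | cons c t =>
    by_cases hpre : old <+: (c :: t)
    · exact Or.inl hpre
    · right
      rw [pvRepl_neg old new c t hpre] at hp
      cases w with
      | nil => exact List.nil_prefix
      | cons w0 w' =>
        rw [List.cons_prefix_cons] at hp ⊢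
        exact ⟨hp.1, pvW old new (w0 :: w') hne h2 hdot t 1 le_rfl (by simp) hp.2⟩

-- Q: a pvRepl pass copies a prefix none of whose positions starts a match
lemma pvQ (old new : List Char) : ∀ (pre X : List Char),
    (∀ j, j < pre.length → ¬ old <+: (pre ++ X).drop j) →
    pvRepl old new (pre ++ X) = pre ++ pvRepl old new X := by
  intro pre
  induction pre with
  | nil => intro X _; simp
  | cons c p ih =>
    intro X h
    have h0 : ¬ old <+: (c :: (p ++ X)) := by simpa using h 0 (by simp)
    rw [List.cons_append, pvRepl_neg old new c (p ++ X) h0]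
    rw [ih X (fun j hj => by simpa using h (j + 1) (by simp; omega))]
    rw [List.cons_append]

-- a value (contains no 'h') passes through a pass for a key (starts with 'h') untouched
lemma pvValue_pass (old new v X : List Char) (hne : old ≠ [])
    (hk : old.getD 0 'z' = 'h') (hv : ∀ j, j < v.length → v.getD j 'z' ≠ 'h') :
    pvRepl old new (v ++ X) = v ++ pvRepl old new X := by
  apply pvQ
  intro j hj
  apply pvNotPrefix_of_getD_ne old _ hne 'z'
  rw [pvGetD_drop0 _ j 'z' (by simp; omega)]
  rw [pvGetD_append v X j 'z' hj, hk]
  exact hv j hj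

-- a key k (no 'h' at positions ≥ 1) passes through a pass for old if old does not match at 0
lemma pvKey_pass (old new k X : List Char) (hne : old ≠ [])
    (hk : old.getD 0 'z' = 'h') (htail : ∀ j, j < k.length → 1 ≤ j → k.getD j 'z' ≠ 'h')
    (h0 : ¬ old <+: (k ++ X)) :
    pvRepl old new (k ++ X) = k ++ pvRepl old new X := by
  apply pvQ
  intro j hj
  cases Nat.eq_zero_or_pos j with
  | inl hz => subst hz; simpa using h0
  | inr hpos =>
    apply pvNotPrefix_of_getD_ne old _ hne 'z'
    rw [pvGetD_drop0 _ j 'z' (by simp; omega)]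
    rw [pvGetD_append k X j 'z' hj, hk]
    exact htail j hj hpos

-- literal character facts about the three keys/values, all by decide
lemma pvFact_k1_ne : pvK1 ≠ [] := by decide
lemma pvFact_k2_ne : pvK2 ≠ [] := by decide
lemma pvFact_k3_ne : pvK3 ≠ [] := by decide
lemma pvFact_k1_pos : 0 < pvK1.length := by decide
lemma pvFact_k2_pos : 0 < pvK2.length := by decide
lemma pvFact_k3_pos : 0 < pvK3.length := by decide
lemma pvFact_v1_len : 2 ≤ pvV1.length := by decide
lemma pvFact_v2_len : 2 ≤ pvV2.length := by decide
lemma pvFact_k1_h : pvK1.getD 0 'z' = 'h' := by decide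
lemma pvFact_k2_h : pvK2.getD 0 'z' = 'h' := by decide
lemma pvFact_k3_h : pvK3.getD 0 'z' = 'h' := by decide
lemma pvFact_v1_noh : ∀ j, j < pvV1.length → pvV1.getD j 'z' ≠ 'h' := by decide
lemma pvFact_v2_noh : ∀ j, j < pvV2.length → pvV2.getD j 'z' ≠ 'h' := by decide
lemma pvFact_k2_tail : ∀ j, j < pvK2.length → 1 ≤ j → pvK2.getD j 'z' ≠ 'h' := by decide
lemma pvFact_k3_tail : ∀ j, j < pvK3.length → 1 ≤ j → pvK3.getD j 'z' ≠ 'h' := by decide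
lemma pvFact_dot_k2v1 : ∀ i, i < pvK2.length → 1 ≤ i → pvK2.getD i 'z' = pvV1.getD 0 'z' →
    i + 1 < pvK2.length ∧ pvK2.getD (i + 1) 'z' ≠ pvV1.getD 1 'z' := by decide
lemma pvFact_dot_k3v1 : ∀ i, i < pvK3.length → 1 ≤ i → pvK3.getD i 'z' = pvV1.getD 0 'z' →
    i + 1 < pvK3.length ∧ pvK3.getD (i + 1) 'z' ≠ pvV1.getD 1 'z' := by decide
lemma pvFact_dot_k3v2 : ∀ i, i < pvK3.length → 1 ≤ i → pvK3.getD i 'z' = pvV2.getD 0 'z' →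
    i + 1 < pvK3.length ∧ pvK3.getD (i + 1) 'z' ≠ pvV2.getD 1 'z' := by decide
lemma pvFact_k3_le_k2 : pvK3.length ≤ pvK2.length := by decide
lemma pvFact_k2_take : pvK2.take pvK3.length ≠ pvK3 := by decide

-- k2 is never a prefix of k3 ++ anything
lemma pvK2_not_prefix_k3 (X : List Char) : ¬ pvK2 <+: (pvK3 ++ X) := by
  intro hp
  obtain ⟨u, hu⟩ := hp
  apply pvFact_k2_take
  have h := congrArg (List.take pvK3.length) hu
  rw [List.take_append_of_le_length pvFact_k3_le_k2] at h
  rw [List.take_left] at h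
  exact h

-- equation lemmas for pvScanB
lemma pvScanB_nil : pvScanB [] = [] := by rw [pvScanB]

lemma pvScanB_cons (c : Char) (t : List Char) : pvScanB (c :: t) =
    if PySem.Chars.startswith (c :: t) pvK1 then pvV1 ++ pvScanB ((c :: t).drop pvK1.length)
    else if PySem.Chars.startswith (c :: t) pvK2 then pvV2 ++ pvScanB ((c :: t).drop pvK2.length)
    else if PySem.Chars.startswith (c :: t) pvK3 then pvV3 ++ pvScanB ((c :: t).drop pvK3.length)
    else c :: pvScanB t := by
  rw [pvScanB]

lemma pvSw_true {s p : List Char} (h : p <+: s) : PySem.Chars.startswith s p = true := by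
  simp only [PySem.Chars.startswith]
  exact List.isPrefixOf_iff_prefix.mpr h

lemma pvSw_false {s p : List Char} (h : ¬ p <+: s) : ¬ PySem.Chars.startswith s p = true := by
  simp only [PySem.Chars.startswith]
  exact fun hh => h (List.isPrefixOf_iff_prefix.mp hh)

-- the main induction: A's three sequential passes equal B's single scan
lemma pvMain : ∀ (n : Nat) (s : List Char), s.length ≤ n →
    pvRepl pvK3 pvV3 (pvRepl pvK2 pvV2 (pvRepl pvK1 pvV1 s)) = pvScanB s := by
  intro n
  induction n with
  | zero =>
    intro s hs
    have : s = [] := List.eq_nil_of_length_eq_zero (Nat.le_zero.mp hs)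
    subst this
    rw [pvScanB_nil, pvRepl_nil, pvRepl_nil, pvRepl_nil]
  | succ n ih =>
    intro s hs
    cases s with
    | nil => rw [pvScanB_nil, pvRepl_nil, pvRepl_nil, pvRepl_nil]
    | cons c t =>
      have hs' : t.length ≤ n := by simp at hs; omega
      by_cases h1 : pvK1 <+: (c :: t)
      · obtain ⟨r, hr⟩ := h1
        have hrlen : r.length ≤ n := by
          have hl := congrArg List.length hr
          have := pvFact_k1_pos
          simp at hl
          omega
        conv_lhs => rw [← hr]
        rw [pvRepl_pos pvK1 pvV1 _ pvFact_k1_ne (List.prefix_append _ _), List.drop_left]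
        rw [pvValue_pass pvK2 pvV2 pvV1 _ pvFact_k2_ne pvFact_k2_h pvFact_v1_noh]
        rw [pvValue_pass pvK3 pvV3 pvV1 _ pvFact_k3_ne pvFact_k3_h pvFact_v1_noh]
        rw [ih r hrlen]
        rw [pvScanB_cons, if_pos (pvSw_true ⟨r, hr⟩)]
        rw [← hr, List.drop_left]
      · by_cases h2 : pvK2 <+: (c :: t)
        · obtain ⟨r, hr⟩ := h2
          have hrlen : r.length ≤ n := by
            have hl := congrArg List.length hr
            have := pvFact_k2_pos
            simp at hl
            omega
          have h1' : ¬ pvK1 <+: (pvK2 ++ r) := by rw [hr]; exact h1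
          conv_lhs => rw [← hr]
          rw [pvKey_pass pvK1 pvV1 pvK2 r pvFact_k1_ne pvFact_k1_h pvFact_k2_tail h1']
          rw [pvRepl_pos pvK2 pvV2 _ pvFact_k2_ne (List.prefix_append _ _), List.drop_left]
          rw [pvValue_pass pvK3 pvV3 pvV2 _ pvFact_k3_ne pvFact_k3_h pvFact_v2_noh]
          rw [ih r hrlen]
          rw [pvScanB_cons, if_neg (pvSw_false h1), if_pos (pvSw_true ⟨r, hr⟩)]
          rw [← hr, List.drop_left]
        · by_cases h3 : pvK3 <+: (c :: t)
          · obtain ⟨r, hr⟩ := h3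
            have hrlen : r.length ≤ n := by
              have hl := congrArg List.length hr
              have := pvFact_k3_pos
              simp at hl
              omega
            have h1' : ¬ pvK1 <+: (pvK3 ++ r) := by rw [hr]; exact h1
            conv_lhs => rw [← hr]
            rw [pvKey_pass pvK1 pvV1 pvK3 r pvFact_k1_ne pvFact_k1_h pvFact_k3_tail h1']
            rw [pvKey_pass pvK2 pvV2 pvK3 _ pvFact_k2_ne pvFact_k2_h pvFact_k3_tail
              (pvK2_not_prefix_k3 _)]
            rw [pvRepl_pos pvK3 pvV3 _ pvFact_k3_ne (List.prefix_append _ _), List.drop_left]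
            rw [ih r hrlen]
            rw [pvScanB_cons, if_neg (pvSw_false h1), if_neg (pvSw_false h2),
              if_pos (pvSw_true ⟨r, hr⟩)]
            rw [← hr, List.drop_left]
          · have e1 : pvRepl pvK1 pvV1 (c :: t) = c :: pvRepl pvK1 pvV1 t :=
              pvRepl_neg _ _ _ _ h1
            have hk2R : ¬ pvK2 <+: pvRepl pvK1 pvV1 (c :: t) := by
              intro hp
              rcases pvA pvK1 pvV1 pvK2 pvFact_k1_ne pvFact_v1_len pvFact_dot_k2v1 _ hp with h | h
              · exact h1 h
              · exact h2 h
            have hk3R1 : ¬ pvK3 <+: pvRepl pvK1 pvV1 (c :: t) := by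
              intro hp
              rcases pvA pvK1 pvV1 pvK3 pvFact_k1_ne pvFact_v1_len pvFact_dot_k3v1 _ hp with h | h
              · exact h1 h
              · exact h3 h
            rw [e1]
            have e2 : pvRepl pvK2 pvV2 (c :: pvRepl pvK1 pvV1 t) =
                c :: pvRepl pvK2 pvV2 (pvRepl pvK1 pvV1 t) :=
              pvRepl_neg _ _ _ _ (by rw [← e1]; exact hk2R)
            rw [e2]
            have hk3R2 : ¬ pvK3 <+: (c :: pvRepl pvK2 pvV2 (pvRepl pvK1 pvV1 t)) := by
              rw [← e2, ← e1]
              intro hp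
              rcases pvA pvK2 pvV2 pvK3 pvFact_k2_ne pvFact_v2_len pvFact_dot_k3v2 _ hp with h | h
              · exact hk2R (e1 ▸ h)
              · exact hk3R1 (e1 ▸ h)
            rw [pvRepl_neg _ _ _ _ hk3R2]
            rw [ih t hs']
            rw [pvScanB_cons, if_neg (pvSw_false h1), if_neg (pvSw_false h2),
              if_neg (pvSw_false h3)]

lemma pvItems :
    (((PySem.Dict.empty.insert "http://library.brown.edu/usep_data/resources/include_publicationStmt.xml" "../resources/include_publicationStmt.xml").insert
      "http://library.brown.edu/usep_data/resources/include_taxonomies.xml" "../resources/include_taxonomies.xml").insert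
      "http://library.brown.edu/usep_data/resources/titles.xml" "../resources/titles.xml" : PySem.Dict String String).items =
    [("http://library.brown.edu/usep_data/resources/include_publicationStmt.xml", "../resources/include_publicationStmt.xml"),
     ("http://library.brown.edu/usep_data/resources/include_taxonomies.xml", "../resources/include_taxonomies.xml"),
     ("http://library.brown.edu/usep_data/resources/titles.xml", "../resources/titles.xml")] := by
  decide

-- ===== VERDICT (by name: the statement is the Claim_ definition above) =====
theorem update_xml_py_spec : Claim_equal_update_xml_py := by
  intro s _
  show update_xml_py s = update_xml_py_alt s
  unfold update_xml_py
  simp only [pvItems, List.foldl_cons, List.foldl_nil]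
  unfold update_xml_py_alt
  simp only [PySem.Str.replace, String.toList_ofList]
  show String.ofList (PySem.Chars.replace
    (PySem.Chars.replace (PySem.Chars.replace s.toList pvK1 pvV1) pvK2 pvV2) pvK3 pvV3) = _
  rw [pvReplace_eq _ _ _ pvFact_k1_ne, pvReplace_eq _ _ _ pvFact_k2_ne,
    pvReplace_eq _ _ _ pvFact_k3_ne]
  exact congrArg String.ofList (pvMain s.toList.length s.toList le_rfl)
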